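-- pv_equiv track=rewrite | github.com/socloseeee/Diploma_Scheduling_Theory | genethic_algorythm(non-OOP).py | count_load
-- ===== SOURCE A (Python) =====
-- def count_load(individ, n=5, t=255):
--     load_result = [0 for _ in range(n)]
--     proc = [i for i in range(t//n, t + t//n, int(t/n))]
--     for gen, tasks in individ:
--         for i in range(n):
--             if gen <= proc[i]:
--                 load_result[i] += tasks[i]
--                 break
--     return load_result
-- ===== SOURCE B (Python) =====
-- def count_load(individ, n=5, t=255):
--     # Buckets are proc[i] = (i+1)*(t//n); the first bucket with gen <= proc[i]
--     # is idx = ceil(gen/(t//n)) - 1, clamped at 0 -- computed arithmetically,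
--     # with no bucket list and no inner scan.
--     load_result = [0] * n
--     s = t // n
--     for gen, tasks in individ:
--         idx = max(0, -(-gen // s) - 1)
--         if idx < n:
--             load_result[idx] += tasks[idx]
--     return load_result
-- ===== Notes on version B (the rewrite author's own statement) =====
-- stated objective: simpler
-- what changed: B replaces A's materialised threshold list and per-gene inner linear scan with a closed-form arithmetic bucket index idx = max(0, ceil(gen/(t//n)) - 1) (the thresholds are the arithmetic progression (i+1)*(t//n)), so no proc list is built and no inner loop remains.
-- outside the precondition, e.g. on count_load([(0, [5, 6])], 2, -7): A returns [0, 0], B returns [5, 0]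
import Mathlib
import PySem

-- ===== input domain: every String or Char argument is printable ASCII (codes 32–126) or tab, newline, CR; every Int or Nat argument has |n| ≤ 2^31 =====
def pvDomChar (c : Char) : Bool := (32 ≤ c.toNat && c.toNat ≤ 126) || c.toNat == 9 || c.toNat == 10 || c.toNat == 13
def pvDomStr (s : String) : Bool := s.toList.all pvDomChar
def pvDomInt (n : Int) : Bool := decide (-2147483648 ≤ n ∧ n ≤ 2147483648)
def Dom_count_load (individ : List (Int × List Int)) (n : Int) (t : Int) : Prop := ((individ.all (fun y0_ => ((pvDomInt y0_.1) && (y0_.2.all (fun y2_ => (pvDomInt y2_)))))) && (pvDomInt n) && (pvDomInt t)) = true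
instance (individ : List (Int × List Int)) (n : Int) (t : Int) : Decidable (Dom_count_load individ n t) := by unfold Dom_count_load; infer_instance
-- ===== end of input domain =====

-- B computes each gene's bucket index by a closed-form ceiling division instead of
-- scanning A's materialised threshold list (a plainer, list-free loop body); equivalence on Pre_ below.

-- ===== PORT A =====
-- inner 'for i in range(n): if gen <= proc[i]: load[i] += tasks[i]; break'
def countLoadInner (proc tasks : List Int) (gen : Int) (load : List Int) : List Int → List Int
  | [] => load
  | i :: rest =>
      if gen ≤ PySem.List.pyGetD proc i 0 then
        PySem.List.pySetD load i (PySem.List.pyGetD load i 0 + PySem.List.pyGetD tasks i 0)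
      else countLoadInner proc tasks gen load rest

def count_load (individ : List (Int × List Int)) (n : Int) (t : Int) : List Int :=
  let load0 := (PySem.List.pyRange 0 n 1).map (fun _ => (0 : Int))
  let proc := PySem.List.pyRange (PySem.Int.floordiv t n) (t + PySem.Int.floordiv t n) (PySem.Int.truncdiv t n)
  individ.foldl (fun load p => countLoadInner proc p.2 p.1 load (PySem.List.pyRange 0 n 1)) load0

-- ===== PORT B =====
def count_load_alt (individ : List (Int × List Int)) (n : Int) (t : Int) : List Int :=
  let load0 := List.replicate n.toNat (0 : Int)
  let s := PySem.Int.floordiv t n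
  individ.foldl (fun load p =>
    let idx := max 0 (-(PySem.Int.floordiv (-p.1) s) - 1)
    if idx < n then
      PySem.List.pySetD load idx (PySem.List.pyGetD load idx 0 + PySem.List.pyGetD p.2 idx 0)
    else load) load0

-- ===== PRECONDITION & SPEC =====
-- Pre_ admits the function's natural domain 1 ≤ n ≤ t with every gene's matched bucket index
-- (max 0 (⌈gen/(t//n)⌉ - 1), when < n) inside its task list, plus the degenerate n < 0, |t| ≥ |n|
-- region where both programs return []. It excludes: n = 0 and 0 ≤ t < n resp. n < t < -n
-- (A raises ZeroDivisionError or ValueError on a zero range step), genes whose matched bucket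
-- index reaches past their task list (A raises IndexError), and negative t with positive n,
-- where A's scan of the then-descending threshold list is an accident of degenerate input
-- (A returns, B assigns bucket 0).
def Pre_count_load (individ : List (Int × List Int)) (n : Int) (t : Int) : Prop :=
  (1 ≤ n ∧ n ≤ t ∧ ∀ p ∈ individ,
      max 0 (-(PySem.Int.floordiv (-p.1) (PySem.Int.floordiv t n)) - 1) < n →
      max 0 (-(PySem.Int.floordiv (-p.1) (PySem.Int.floordiv t n)) - 1) < (p.2.length : Int)) ∨
  (n < 0 ∧ (t ≤ n ∨ -n ≤ t))
instance (individ : List (Int × List Int)) (n : Int) (t : Int) : Decidable (Pre_count_load individ n t) := by unfold Pre_count_load; infer_instance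

def pvWitness_count_load : (List (Int × List Int)) × Int × Int := ([(1, [2, 3]), (200, [4, 5])], 2, 255)

def Spec_count_load (individ : List (Int × List Int)) (n : Int) (t : Int) (out : List Int) : Prop := out = count_load_alt individ n t
instance (individ : List (Int × List Int)) (n : Int) (t : Int) (out : List Int) : Decidable (Spec_count_load individ n t out) := by unfold Spec_count_load; infer_instance

-- ===== CLAIM (what is proved, stated in full; the proofs are below) =====
def Claim_equal_count_load : Prop := ∀ (individ : List (Int × List Int)) (n : Int) (t : Int), Dom_count_load individ n t → Pre_count_load individ n t → Spec_count_load individ n t (count_load individ n t)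

-- ===== LEMMAS AND PROOFS =====

-- the i-th threshold of A's proc list is (i+1)*(t//n), for 1 ≤ n ≤ t and 0 ≤ i < n
theorem procGet {n t i : Int} (hn : 1 ≤ n) (hnt : n ≤ t) (hi0 : 0 ≤ i) (hin : i < n) :
    PySem.List.pyGetD
      (PySem.List.pyRange (PySem.Int.floordiv t n) (t + PySem.Int.floordiv t n) (PySem.Int.truncdiv t n))
      i 0 = (i + 1) * PySem.Int.floordiv t n := by
  have hn0 : 0 < n := by omega
  have ht0 : 0 < t := by omega
  have hfd : PySem.Int.floordiv t n = t / n := PySem.Int.floordiv_eq_ediv_of_pos hn0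
  have hs : 1 ≤ PySem.Int.floordiv t n :=
    (PySem.Int.le_floordiv_iff_mul_le hn0).mpr (by omega)
  have htd : PySem.Int.truncdiv t n = PySem.Int.floordiv t n := by
    show t.tdiv n = _
    rw [hfd, Int.tdiv_eq_ediv_of_nonneg (by omega)]
  set s := PySem.Int.floordiv t n with hsdef
  have hts : n * s ≤ t := by
    have := PySem.Int.floordiv_mul_add_mod t n
    have := PySem.Int.mod_nonneg t hn0
    nlinarith
  rw [htd, PySem.List.pyRange_of_pos _ _ (by omega)]
  have hif : s < t + s := by omega
  rw [if_pos hif]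
  have hlen : n ≤ (t + s - s + s - 1) / s := by
    rw [Int.le_ediv_iff_mul_le (by omega)]
    omega
  have hiN : i.toNat < ((t + s - s + s - 1) / s).toNat := by omega
  rw [PySem.List.pyGetD_eq_getElem _ 0 hi0 (by simp only [List.length_map, List.length_range]; omega)]
  simp only [List.getElem_map, List.getElem_range]
  have : ((i.toNat : Int)) = i := by omega
  rw [this]; ring

-- gen ≤ (i+1)*s  ↔  the closed-form bucket index is ≤ i   (s > 0, i ≥ 0)
theorem bucketIff {s gen i : Int} (hs : 0 < s) (hi : 0 ≤ i) :
    (gen ≤ (i + 1) * s ↔ max 0 (-(PySem.Int.floordiv (-gen) s) - 1) ≤ i) := by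
  have h := PySem.Int.le_floordiv_iff_mul_le (a := -gen) (b := s) (q := -(i + 1)) hs
  have hmul : (-(i + 1)) * s = -((i + 1) * s) := by ring
  rw [hmul] at h
  constructor
  · intro hg
    have : -(i + 1) ≤ PySem.Int.floordiv (-gen) s := h.mpr (by omega)
    omega
  · intro hg
    have : -((i + 1) * s) ≤ -gen := h.mp (by omega)
    omega

-- the first-match scan over indices [j, n) equals a direct update at idx (if idx < n)
theorem scanEq {proc tasks load : List Int} {gen idx n : Int}
    (hchar : ∀ i, 0 ≤ i → i < n → (gen ≤ PySem.List.pyGetD proc i 0 ↔ idx ≤ i)) :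
    ∀ j, 0 ≤ j → j ≤ idx →
      countLoadInner proc tasks gen load (PySem.List.pyRange j n 1) =
        (if idx < n then
          PySem.List.pySetD load idx (PySem.List.pyGetD load idx 0 + PySem.List.pyGetD tasks idx 0)
         else load)
  | j, hj, hji => by
      by_cases hlt : j < n
      · rw [PySem.List.pyRange_one_cons hlt]
        simp only [countLoadInner]
        have hcj := hchar j hj hlt
        by_cases hg : gen ≤ PySem.List.pyGetD proc j 0
        · have hidx : idx = j := le_antisymm (hcj.mp hg) hji
          rw [if_pos hg, if_pos (by omega), hidx]
        · have hnext : j + 1 ≤ idx := by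
            have := hcj.mpr; omega
          rw [if_neg hg]
          exact scanEq hchar (j + 1) (by omega) hnext
      · rw [PySem.List.pyRange_one_eq_nil (by omega)]
        simp only [countLoadInner]
        rw [if_neg (by omega)]
  termination_by j => (n - j).toNat
  decreasing_by omega

theorem foldlConst {α : Type} (l : List (Int × List Int)) (a : α) :
    l.foldl (fun acc _ => acc) a = a := by
  induction l generalizing a with
  | nil => rfl
  | cons x xs ih => simp [List.foldl, ih a]

-- ===== VERDICT (by name: the statement is the Claim_ definition above) =====
theorem count_load_spec : Claim_equal_count_load := by
  intro individ n t _hdom hpre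
  unfold Spec_count_load
  simp only [count_load, count_load_alt]
  rcases hpre with ⟨hn, hnt, _⟩ | ⟨hn, _⟩
  · -- main region 1 ≤ n ≤ t
    have hn0 : 0 < n := by omega
    have hs : 1 ≤ PySem.Int.floordiv t n :=
      (PySem.Int.le_floordiv_iff_mul_le hn0).mpr (by omega)
    have hinit : (PySem.List.pyRange 0 n 1).map (fun _ => (0 : Int)) = List.replicate n.toNat (0 : Int) := by
      rw [PySem.List.pyRange_one]
      simp [Function.comp_def, List.map_const']
    rw [hinit]
    congr 1
    funext load p
    have hchar : ∀ i, 0 ≤ i → i < n →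
        (p.1 ≤ PySem.List.pyGetD
          (PySem.List.pyRange (PySem.Int.floordiv t n) (t + PySem.Int.floordiv t n) (PySem.Int.truncdiv t n))
          i 0 ↔ max 0 (-(PySem.Int.floordiv (-p.1) (PySem.Int.floordiv t n)) - 1) ≤ i) := by
      intro i hi0 hin
      rw [procGet hn hnt hi0 hin]
      exact bucketIff (by omega) hi0
    exact scanEq hchar 0 le_rfl (le_max_left _ _)
  · -- degenerate region n < 0: both sides are []
    have h0 : n.toNat = 0 := by omega
    rw [h0]
    have hA : (PySem.List.pyRange 0 n 1).map (fun _ => (0 : Int)) = ([] : List Int) := by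
      rw [PySem.List.pyRange_one_eq_nil (by omega)]; rfl
    rw [hA]
    have hstepA : (fun (load : List Int) (p : Int × List Int) =>
        countLoadInner (PySem.List.pyRange (PySem.Int.floordiv t n) (t + PySem.Int.floordiv t n) (PySem.Int.truncdiv t n)) p.2 p.1 load (PySem.List.pyRange 0 n 1)) =
        fun load _ => load := by
      funext load p
      rw [PySem.List.pyRange_one_eq_nil (by omega)]
      rfl
    have hstepB : (fun (load : List Int) (p : Int × List Int) =>
        if max 0 (-(PySem.Int.floordiv (-p.1) (PySem.Int.floordiv t n)) - 1) < n then
          PySem.List.pySetD load (max 0 (-(PySem.Int.floordiv (-p.1) (PySem.Int.floordiv t n)) - 1))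
            (PySem.List.pyGetD load (max 0 (-(PySem.Int.floordiv (-p.1) (PySem.Int.floordiv t n)) - 1)) 0 +
             PySem.List.pyGetD p.2 (max 0 (-(PySem.Int.floordiv (-p.1) (PySem.Int.floordiv t n)) - 1)) 0)
        else load) = fun load _ => load := by
      funext load p
      rw [if_neg (by have := le_max_left 0 (-(PySem.Int.floordiv (-p.1) (PySem.Int.floordiv t n)) - 1); omega)]
    rw [hstepA, hstepB, foldlConst, foldlConst]
    rfl
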